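-- pv_equiv track=rewrite | github.com/Daringpark/academic | 2_2_Algorythm/24.02.23/password.py | x0tonumber
-- ===== SOURCE A (Python) =====
-- def x0tonumber(number):
--     if not number.isdigit(): # 16진수 to 10진수
--         P = ord(number) - 55
--     else:
--         P = int(number)
--     point = ''
--     for i in range(4): # 10진수 to 2진수 변환
--         point = str(P%2) + point
--         P //= 2
--     return point # 2진수 string으로 들어가게 된다.
-- ===== SOURCE B (Python) =====
-- def x0tonumber(number):
--     if not number.isdigit():  # hex digit letter -> value via ord
--         P = ord(number) - 55
--     else:
--         P = int(number)
--     return format(P & 15, '04b')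
-- ===== Notes on version B (the rewrite author's own statement) =====
-- stated objective: idiomatic
-- what changed: B keeps A's hex-digit-to-int branch but replaces the 4-iteration divide-and-prepend loop with a closed-form binary formatting of the low 4 bits.
import Mathlib
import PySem

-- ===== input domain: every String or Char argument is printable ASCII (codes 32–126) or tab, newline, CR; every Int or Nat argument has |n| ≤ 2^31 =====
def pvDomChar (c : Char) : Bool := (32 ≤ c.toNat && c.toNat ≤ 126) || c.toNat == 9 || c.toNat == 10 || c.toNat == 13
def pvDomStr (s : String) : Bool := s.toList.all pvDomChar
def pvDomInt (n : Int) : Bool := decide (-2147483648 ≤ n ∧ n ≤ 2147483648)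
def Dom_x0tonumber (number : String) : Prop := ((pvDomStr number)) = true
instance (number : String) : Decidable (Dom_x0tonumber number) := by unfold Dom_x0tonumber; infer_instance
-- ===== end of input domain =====

-- B replaces A's 4-iteration bit loop by closed-form binary formatting of the low 4 bits (idiomatic; return value only).
-- ===== PORT A =====
def x0tonumber (number : String) : String :=
  String.ofList
    (((PySem.List.pyRange 0 4 1).foldl
        (fun (st : Int × List Char) _ =>
          (PySem.Int.floordiv st.1 2, PySem.Int.toChars (PySem.Int.mod st.1 2) ++ st.2))
        ((if !(PySem.Str.strIsdigit number) then
            -- ord of number: raises unless number is a single character (such inputs are outside Pre_);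
            -- under Pre_ the list is [c], so headD reads exactly that character
            (((number.toList.headD 'A').toNat : Int) - 55)
          else (PySem.Int.ofStr? number).getD 0),   -- int of number: always succeeds when isdigit holds
         ([] : List Char))).2)

-- ===== PORT B =====
def x0tonumber_alt (number : String) : String :=
  -- B's format call: binary digits of the low 4 bits, zero-padded to width 4
  String.ofList
    (PySem.Chars.zfill
      (PySem.Int.toBinChars
        (PySem.Int.band
          (if !(PySem.Str.strIsdigit number) then
             (((number.toList.headD 'A').toNat : Int) - 55)
           else (PySem.Int.ofStr? number).getD 0)
          15))
      4)

-- ===== PRECONDITION & SPEC =====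
-- Pre_ excludes exactly the inputs on which Python A raises: a non-digit string that is not a
-- single character makes the ord call raise TypeError (both programs raise there identically).
def Pre_x0tonumber (number : String) : Prop :=
  PySem.Str.strIsdigit number = true ∨ number.toList.length = 1
instance (number : String) : Decidable (Pre_x0tonumber number) := by unfold Pre_x0tonumber; infer_instance
def pvWitness_x0tonumber : String := "A"

def Spec_x0tonumber (number : String) (out : String) : Prop := out = x0tonumber_alt number
instance (number : String) (out : String) : Decidable (Spec_x0tonumber number out) := by unfold Spec_x0tonumber; infer_instance

-- ===== CLAIM (what is proved, stated in full; the proofs are below) =====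
def Claim_equal_x0tonumber : Prop := ∀ (number : String), Dom_x0tonumber number → Pre_x0tonumber number → Spec_x0tonumber number (x0tonumber number)

-- ===== LEMMAS AND PROOFS =====

-- Python's P & 15 is the floor residue of P modulo 16, for every integer P.
lemma pv_band15 (a : Int) : PySem.Int.band a 15 = a % 16 := by
  unfold PySem.Int.band
  have h15 : Int.toNat 15 = 15 := rfl
  simp only [h15]
  split_ifs with h1 h2 h2
  · have := Nat.and_two_pow_sub_one_eq_mod a.toNat 4
    norm_num at this
    omega
  · norm_num at h2
  · have hc : (15 : Nat) &&& (-a - 1).toNat = (-a - 1).toNat % 16 := by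
      rw [Nat.and_comm]
      have := Nat.and_two_pow_sub_one_eq_mod (-a - 1).toNat 4
      simp only [show (2 ^ 4 : Nat) = 16 from rfl] at this
      exact this
    omega
  · norm_num at h2

-- The 4-step divide-and-prepend loop of A equals B's zero-padded binary rendering of P & 15.
lemma pv_key (P : Int) :
    String.ofList
      (((PySem.List.pyRange 0 4 1).foldl
          (fun (st : Int × List Char) _ =>
            (PySem.Int.floordiv st.1 2, PySem.Int.toChars (PySem.Int.mod st.1 2) ++ st.2))
          (P, ([] : List Char))).2)
    = String.ofList (PySem.Chars.zfill (PySem.Int.toBinChars (PySem.Int.band P 15)) 4) := by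
  have h1 : PySem.List.pyRange 0 4 1 = [0, 1, 2, 3] := by decide
  rw [h1, pv_band15]
  simp only [List.foldl,
    PySem.Int.mod_eq_emod_of_pos (show (0:Int) < 2 by norm_num),
    PySem.Int.floordiv_eq_ediv_of_pos (show (0:Int) < 2 by norm_num)]
  obtain ⟨r, hPr⟩ : ∃ r, P % 16 = r := ⟨P % 16, rfl⟩
  have hr0 : 0 ≤ r := by omega
  have hr16 : r < 16 := by omega
  have e0 : P % 2 = r % 2 := by omega
  have e1 : P / 2 % 2 = r / 2 % 2 := by omega
  have e2 : P / 2 / 2 % 2 = r / 2 / 2 % 2 := by omega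
  have e3 : P / 2 / 2 / 2 % 2 = r / 2 / 2 / 2 % 2 := by omega
  rw [hPr, e0, e1, e2, e3]
  interval_cases r <;> decide

-- ===== VERDICT (by name: the statement is the Claim_ definition above) =====
theorem x0tonumber_spec : Claim_equal_x0tonumber := by
  intro number _ _
  unfold Spec_x0tonumber x0tonumber x0tonumber_alt
  exact pv_key _
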